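-- pv_equiv track=rewrite | github.com/Macorov/University_Practice | practice6.py | show_palindrome
-- ===== SOURCE A (Python) =====
-- def show_palindrome(num):
--     final = ""
--     count = 0
--     for i in range(1,num+1):
--         i = str(i)
--         final += i
--         count += 1
--     for i in range(1,num):
--         count -= 1
--         final += str(count)
--     return final
-- ===== SOURCE B (Python) =====
-- def show_palindrome(num):
--     return "".join(str(i if i <= num else 2 * num - i) for i in range(1, 2 * num))
-- ===== Notes on version B (the rewrite author's own statement) =====
-- stated objective: alternative
-- what changed: B replaces A's two loops (ascending append, then descending append driven by a decrementing counter) with a single loop over all output positions, computing each entry by an arithmetic mirror formula (min of the index and its reflection about the apex) and joining once.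
import Mathlib
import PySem

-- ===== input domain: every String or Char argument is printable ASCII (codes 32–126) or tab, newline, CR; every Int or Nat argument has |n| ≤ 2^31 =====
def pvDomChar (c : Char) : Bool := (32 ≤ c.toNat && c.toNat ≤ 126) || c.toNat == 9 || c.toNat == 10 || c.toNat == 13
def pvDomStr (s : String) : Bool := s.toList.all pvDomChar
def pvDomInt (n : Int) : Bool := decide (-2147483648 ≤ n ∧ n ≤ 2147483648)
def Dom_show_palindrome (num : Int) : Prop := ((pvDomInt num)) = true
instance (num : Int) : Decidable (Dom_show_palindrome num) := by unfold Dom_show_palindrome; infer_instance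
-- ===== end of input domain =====

-- B emits all 2*num-1 palindrome entries in ONE loop via the arithmetic mirror formula
-- (i if i <= num else 2*num - i), instead of A's two passes with a decrementing counter.

-- ===== PORT A =====
-- A accumulates (final, count); str(i) is PySem.Int.toChars at char level, String.ofList at the end.
def show_palindrome (num : Int) : String :=
  let s1 := (PySem.List.pyRange 1 (num + 1) 1).foldl
      (fun (st : List Char × Int) i => (st.1 ++ PySem.Int.toChars i, st.2 + 1)) ([], 0)
  let s2 := (PySem.List.pyRange 1 num 1).foldl
      (fun (st : List Char × Int) _ => (st.1 ++ PySem.Int.toChars (st.2 - 1), st.2 - 1)) s1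
  String.ofList s2.1

-- ===== PORT B =====
-- "".join(str(i if i <= num else 2*num - i) for i in range(1, 2*num))
def show_palindrome_alt (num : Int) : String :=
  String.ofList (PySem.Chars.join []
    ((PySem.List.pyRange 1 (2 * num) 1).map
      (fun i => PySem.Int.toChars (if i ≤ num then i else 2 * num - i))))

-- ===== PRECONDITION & SPEC =====
def Spec_show_palindrome (num : Int) (out : String) : Prop := out = show_palindrome_alt num
instance (num : Int) (out : String) : Decidable (Spec_show_palindrome num out) := by unfold Spec_show_palindrome; infer_instance

-- ===== CLAIM (what is proved, stated in full; the proofs are below) =====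
def Claim_equal_show_palindrome : Prop := ∀ (num : Int), Dom_show_palindrome num → Spec_show_palindrome num (show_palindrome num)

-- ===== LEMMAS AND PROOFS =====

-- A's first loop appends str(i) for each i and counts the elements.
theorem loop1_eq (l : List Int) (a : List Char) (c : Int) :
    l.foldl (fun (st : List Char × Int) i => (st.1 ++ PySem.Int.toChars i, st.2 + 1)) (a, c)
      = (a ++ (l.map PySem.Int.toChars).flatten, c + l.length) := by
  induction l generalizing a c with
  | nil => simp
  | cons x xs ih =>
      simp only [List.foldl_cons, ih, List.map_cons, List.flatten_cons, List.length_cons,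
        Prod.mk.injEq]
      refine ⟨by simp, by push_cast; ring⟩

-- A's second loop appends str(c-1), str(c-2), … once per element of l: a countdown range.
theorem loop2_eq (l : List Int) (a : List Char) (c : Int) :
    l.foldl (fun (st : List Char × Int) _ => (st.1 ++ PySem.Int.toChars (st.2 - 1), st.2 - 1)) (a, c)
      = (a ++ ((PySem.List.pyRange (c - 1) (c - 1 - l.length) (-1)).map PySem.Int.toChars).flatten,
          c - l.length) := by
  induction l generalizing a c with
  | nil =>
      rw [List.foldl_nil, PySem.List.pyRange_neg_one_eq_nil (by simp)]
      simp
  | cons x xs ih =>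
      rw [List.foldl_cons, ih]
      have hb : c - 1 - ((xs.length : Int) + 1) < c - 1 := by omega
      have harg : c - 1 - ((x :: xs).length : Int) = c - 1 - ((xs.length : Int) + 1) := by
        push_cast [List.length_cons]; ring
      rw [harg, PySem.List.pyRange_neg_one_cons hb]
      have harg2 : c - 1 - 1 - ((xs.length : Int)) = c - 1 - ((xs.length : Int) + 1) := by ring
      simp only [List.map_cons, List.flatten_cons, Prod.mk.injEq, List.append_assoc, harg2]
      refine ⟨trivial, by push_cast [List.length_cons]; ring⟩

-- "".join with empty separator is flatten.
theorem join_empty_sep (parts : List (List Char)) :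
    PySem.Chars.join [] parts = parts.flatten := by
  induction parts with
  | nil => simp [PySem.Chars.join, List.intercalate]
  | cons a rest ih =>
      cases rest with
      | nil => simp [PySem.Chars.join, List.intercalate]
      | cons b t => rw [PySem.Chars.join_cons_cons]; simp [ih]

-- mapping i ↦ c - i over an ascending range yields the countdown range.
theorem map_sub_pyRange (c a b : Int) :
    (PySem.List.pyRange a b 1).map (fun i => c - i)
      = PySem.List.pyRange (c - a) (c - b) (-1) := by
  rw [PySem.List.pyRange_one, PySem.List.pyRange_neg_one]
  have h : (c - a - (c - b)).toNat = (b - a).toNat := by omega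
  rw [h, List.map_map]
  exact List.map_congr_left (fun k _ => by simp; ring)

theorem main_eq (num : Int) : show_palindrome num = show_palindrome_alt num := by
  unfold show_palindrome show_palindrome_alt
  simp only [loop1_eq, join_empty_sep]
  by_cases h : num < 1
  · rw [PySem.List.pyRange_one_eq_nil (by omega : num + 1 ≤ 1),
      PySem.List.pyRange_one_eq_nil (by omega : num ≤ 1),
      PySem.List.pyRange_one_eq_nil (by omega : 2 * num ≤ 1)]
    simp
  · have h1 : (1 : Int) ≤ num := by omega
    rw [loop2_eq]
    have hlen1 : ((PySem.List.pyRange 1 (num + 1) 1).length : Int) = num := by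
      rw [PySem.List.length_pyRange_one]; omega
    have hlen2 : ((PySem.List.pyRange 1 num 1).length : Int) = num - 1 := by
      rw [PySem.List.length_pyRange_one]; omega
    rw [hlen1, hlen2]
    have e1 : (0 : Int) + num - 1 - (num - 1) = 0 := by ring
    have e2 : (0 : Int) + num - 1 = num - 1 := by ring
    rw [e1, e2,
      PySem.List.pyRange_one_append (a := 1) (m := num + 1) (b := 2 * num)
        (by omega) (by omega), List.map_append, List.flatten_append]
    have hfst : (PySem.List.pyRange 1 (num + 1) 1).map
        (fun i => PySem.Int.toChars (if i ≤ num then i else 2 * num - i))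
          = (PySem.List.pyRange 1 (num + 1) 1).map PySem.Int.toChars := by
      refine List.map_congr_left (fun i hi => ?_)
      have := (PySem.List.mem_pyRange_one).1 hi
      rw [if_pos (by omega)]
    have hsnd : (PySem.List.pyRange (num + 1) (2 * num) 1).map
        (fun i => PySem.Int.toChars (if i ≤ num then i else 2 * num - i))
          = (PySem.List.pyRange (num - 1) 0 (-1)).map PySem.Int.toChars := by
      have hc : (PySem.List.pyRange (num + 1) (2 * num) 1).map
          (fun i => PySem.Int.toChars (if i ≤ num then i else 2 * num - i))
            = (PySem.List.pyRange (num + 1) (2 * num) 1).map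
              (fun i => PySem.Int.toChars (2 * num - i)) := by
        refine List.map_congr_left (fun i hi => ?_)
        have := (PySem.List.mem_pyRange_one).1 hi
        rw [if_neg (by omega)]
      rw [hc, show (fun i => PySem.Int.toChars (2 * num - i))
            = PySem.Int.toChars ∘ (fun i => 2 * num - i) from rfl,
        ← List.map_map, map_sub_pyRange]
      congr 1 <;> ring_nf
    rw [hfst, hsnd]
    simp

-- ===== VERDICT (by name: the statement is the Claim_ definition above) =====
theorem show_palindrome_spec : Claim_equal_show_palindrome := by
  intro num _
  unfold Spec_show_palindrome
  exact main_eq num
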